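-- pv_equiv track=rewrite | github.com/star-sil/coding-test | 구현/M17140.py | calC
-- ===== SOURCE A (Python) =====
-- def calC(a):
--     b = []
--
--     for i in range(len(a[0])):
--         tmp = []
--         g = [0] * 100
--         for j in range(len(a)):
--             if a[j][i] > 0:
--                 g[a[j][i]-1] += 1
--         # 갯수 맵핑
--         for j in range(100):
--             if g[j] > 0:
--                 tmp.append((g[j],j+1)) # 등장 횟수, 수
--         b.append(tmp)
--
--     # 정렬
--     for i in b:
--         i.sort()
--
--     # 길이 구하기
--     length = 0
--     for i in range(len(b)):
--         length = max(length,len(b[i]))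
--
--     if length > 50:
--         length = 50
--
--     for i in range(len(b)):
--         if len(b[i]) < length:
--             l = length - len(b[i])
--             for j in range(l):
--                 b[i].append((0,0))
--         elif len(b[i]) > 50:
--             b[i] = b[i][:50]
--
--
--
--     # 다시 배열 생성
--     new_a = []
--
--     for _ in range(length*2):
--         new_a.append([])
--
--
--     for i in range(len(b)):
--         l = len(b[i])
--         for j in range(l): # 행마다 길이가 다르다.
--             new_a[2*j].append(b[i][j][1])
--             new_a[2*j+1].append(b[i][j][0])
--
--     return new_a
-- ===== SOURCE B (Python) =====
-- def calC(a):
--     # Sort each column's positive values and run-length encode the sorted runs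
--     # (sort-then-scan instead of frequency counting), then emit the output rows
--     # directly pair-index by pair-index (no padding/truncation/transpose passes).
--     cols = []
--     for i in range(len(a[0])):
--         vals = sorted(row[i] for row in a if row[i] > 0)
--         pairs = []
--         run, prev = 0, None
--         for v in vals:
--             if v == prev:
--                 run += 1
--             else:
--                 if run:
--                     pairs.append((run, prev))
--                 run, prev = 1, v
--         if run:
--             pairs.append((run, prev))
--         pairs.sort()
--         cols.append(pairs)
--     length = min(max(map(len, cols), default=0), 50)
--     out = []
--     for j in range(length):
--         out.append([c[j][1] if j < len(c) else 0 for c in cols])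
--         out.append([c[j][0] if j < len(c) else 0 for c in cols])
--     return out
-- ===== Notes on version B (the rewrite author's own statement) =====
-- stated objective: alternative
-- what changed: Per column, B sorts the positive values and run-length encodes the consecutive runs into (count, value) pairs (sort-then-scan) instead of A's 100-bucket frequency array with a range(100) scan, and it emits the output rows directly pair-index by pair-index with a guarded column lookup, so A's padding loop, truncation slice and preallocate-then-index-append transpose disappear entirely.
import Mathlib
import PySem

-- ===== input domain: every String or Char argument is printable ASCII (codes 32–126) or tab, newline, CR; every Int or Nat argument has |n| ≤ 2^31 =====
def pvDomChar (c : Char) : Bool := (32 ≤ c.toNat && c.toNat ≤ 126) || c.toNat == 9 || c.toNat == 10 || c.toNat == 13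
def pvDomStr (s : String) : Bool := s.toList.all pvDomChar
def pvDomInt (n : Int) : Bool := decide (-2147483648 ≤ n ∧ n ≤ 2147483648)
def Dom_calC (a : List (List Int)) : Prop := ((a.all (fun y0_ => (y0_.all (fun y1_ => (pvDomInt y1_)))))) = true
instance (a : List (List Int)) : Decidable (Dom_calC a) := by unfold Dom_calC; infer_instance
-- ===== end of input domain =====

-- B sorts each column's positive values and run-length encodes the sorted runs into
-- (count, value) pairs instead of A's 100-bucket count array with a range(100) scan,
-- and emits the output rows directly with a guarded column lookup instead of A's
-- pad / truncate / preallocate-and-transpose passes (objective: alternative;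
-- equivalence is about the return value, A mutates nothing observable).

-- ===== PORT A =====
-- helper: A's code after the per-column (count, value) lists are built and sorted
def calC_tail (b0 : List (List (Int × Int))) : List (List Int) :=
  -- length = 0 ; for i in range(len(b)): length = max(length, len(b[i])) ; cap at 50
  let length : Int :=
    (PySem.List.pyRange 0 (PySem.List.len b0)).foldl
      (fun len i => max len (PySem.List.len (PySem.List.pyGetD b0 i []))) 0
  let length : Int := if length > 50 then 50 else length
  -- pad with (0,0) up to length / truncate to 50
  let b : List (List (Int × Int)) :=
    (PySem.List.pyRange 0 (PySem.List.len b0)).foldl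
      (fun b i =>
        if PySem.List.len (PySem.List.pyGetD b i []) < length then
          PySem.List.pySetD b i
            ((PySem.List.pyRange 0 (length - PySem.List.len (PySem.List.pyGetD b i []))).foldl
              (fun bi _ => bi ++ [((0 : Int), (0 : Int))]) (PySem.List.pyGetD b i []))
        else if PySem.List.len (PySem.List.pyGetD b i []) > 50 then
          PySem.List.pySetD b i (PySem.List.slice (PySem.List.pyGetD b i []) none (some 50))
        else b) b0
  -- new_a = [] ; for _ in range(length*2): new_a.append([])
  let newA : List (List Int) :=
    (PySem.List.pyRange 0 (length * 2)).foldl (fun na _ => na ++ [([] : List Int)]) []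
  -- for i in range(len(b)): for j in range(len(b[i])): new_a[2j].append(..); new_a[2j+1].append(..)
  (PySem.List.pyRange 0 (PySem.List.len b)).foldl
    (fun na i =>
      (PySem.List.pyRange 0 (PySem.List.len (PySem.List.pyGetD b i []))).foldl
        (fun na j =>
          let p := PySem.List.pyGetD (PySem.List.pyGetD b i []) j (0, 0)
          let na := PySem.List.pySetD na (2 * j)
            (PySem.List.pyGetD na (2 * j) [] ++ [p.2])
          PySem.List.pySetD na (2 * j + 1)
            (PySem.List.pyGetD na (2 * j + 1) [] ++ [p.1])) na) newA

def calC (a : List (List Int)) : List (List Int) :=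
  -- b = [] ; for i in range(len(a[0])): build g (100 buckets), then tmp, append
  let b : List (List (Int × Int)) :=
    (PySem.List.pyRange 0 (PySem.List.len (PySem.List.pyGetD a 0 []))).foldl
      (fun b i =>
        let g : List Int :=
          (PySem.List.pyRange 0 (PySem.List.len a)).foldl
            (fun g j =>
              let v := PySem.List.pyGetD (PySem.List.pyGetD a j []) i 0
              if v > 0 then
                PySem.List.pySetD g (v - 1) (PySem.List.pyGetD g (v - 1) 0 + 1)
              else g)
            (List.replicate 100 (0 : Int))
        let tmp : List (Int × Int) :=
          (PySem.List.pyRange 0 100).foldl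
            (fun tmp j =>
              if PySem.List.pyGetD g j 0 > 0 then tmp ++ [(PySem.List.pyGetD g j 0, j + 1)]
              else tmp) []
        b ++ [tmp]) []
  -- for i in b: i.sort()  (then the rest of A's code)
  calC_tail (b.map (fun col => PySem.List.sorted2 col Prod.fst Prod.snd))

-- ===== PORT B =====
-- B's run-length fold state is (pairs, run, prev); Python's prev starts as None
-- (Option Int here, 'v == prev' is 'some v == prev'); Python appends the int prev
-- only when run ≠ 0, where prev is set — rendered 'prev.getD 0'.
def rleStep (st : List (Int × Int) × Int × Option Int) (v : Int) :
    List (Int × Int) × Int × Option Int :=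
  if some v == st.2.2 then (st.1, st.2.1 + 1, st.2.2)
  else ((if st.2.1 ≠ 0 then st.1 ++ [(st.2.1, st.2.2.getD 0)] else st.1), 1, some v)

-- 'if run: pairs.append((run, prev))' after the loop
def rleFlush (st : List (Int × Int) × Int × Option Int) : List (Int × Int) :=
  if st.2.1 ≠ 0 then st.1 ++ [(st.2.1, st.2.2.getD 0)] else st.1

-- one column of B: sort the positive values, run-length encode, sort the pairs
def calC_alt_col (a : List (List Int)) (i : Int) : List (Int × Int) :=
  PySem.List.sorted2
    (rleFlush
      ((PySem.List.sorted
          ((a.map (fun row => PySem.List.pyGetD row i 0)).filter (fun v => decide (v > 0)))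
          (fun x => x)).foldl rleStep ([], 0, none)))
    Prod.fst Prod.snd

-- B's code after the per-column sorted (count, value) lists are built:
-- emit rows directly, pair index by pair index, with a guarded column lookup
def calC_alt_tail (cols : List (List (Int × Int))) : List (List Int) :=
  let length : Int := min (PySem.List.maxD (cols.map PySem.List.len) (fun x => x) 0) 50
  (PySem.List.pyRange 0 length).foldl
    (fun out j =>
      out ++ [cols.map (fun c =>
               if j < PySem.List.len c then (PySem.List.pyGetD c j ((0 : Int), (0 : Int))).2 else 0)]
          ++ [cols.map (fun c =>
               if j < PySem.List.len c then (PySem.List.pyGetD c j ((0 : Int), (0 : Int))).1 else 0)])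
    []

def calC_alt (a : List (List Int)) : List (List Int) :=
  calC_alt_tail
    ((PySem.List.pyRange 0 (PySem.List.len (PySem.List.pyGetD a 0 []))).foldl
      (fun cols i => cols ++ [calC_alt_col a i]) [])

-- ===== PRECONDITION & SPEC =====
-- Pre_ excludes exactly the inputs where A raises: an empty matrix (IndexError on a[0]),
-- a row shorter than the first row (IndexError on a[j][i]), and a scanned value above 100
-- (IndexError on the 100-slot bucket array g).
def Pre_calC (a : List (List Int)) : Prop :=
  a ≠ [] ∧ ∀ row ∈ a, (a.headD []).length ≤ row.length ∧
    ∀ v ∈ row.take (a.headD []).length, v ≤ 100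
instance (a : List (List Int)) : Decidable (Pre_calC a) := by unfold Pre_calC; infer_instance
def pvWitness_calC : List (List Int) := [[1, 2], [1, 100]]

def Spec_calC (a : List (List Int)) (out : List (List Int)) : Prop := out = calC_alt a
instance (a : List (List Int)) (out : List (List Int)) : Decidable (Spec_calC a out) := by unfold Spec_calC; infer_instance

-- ===== CLAIM (what is proved, stated in full; the proofs are below) =====
def Claim_equal_calC : Prop := ∀ (a : List (List Int)), Dom_calC a → Pre_calC a → Spec_calC a (calC a)

-- ===== LEMMAS AND PROOFS =====

-- the values of column i (as A and B read them)
def colList (a : List (List Int)) (i : Int) : List Int :=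
  a.map (fun row => PySem.List.pyGetD row i 0)

-- Python's sort on pairs is the sort by the lexicographic key
theorem sorted2_eq_sorted_toLex (xs : List (Int × Int)) :
    PySem.List.sorted2 xs Prod.fst Prod.snd
      = PySem.List.sorted xs (fun p => toLex p) := by
  unfold PySem.List.sorted2 PySem.List.sorted
  simp only [if_neg (by decide : ¬ (false = true))]
  have hfun : (fun (a b : Int × Int) =>
      decide (a.1 < b.1) || (!decide (b.1 < a.1) && decide (a.2 < b.2)))
      = fun (a b : Int × Int) => decide (toLex a < toLex b) := by
    funext p q
    rcases lt_trichotomy p.1 q.1 with h | h | h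
    · simp [Prod.Lex.lt_iff, h]
    · simp [Prod.Lex.lt_iff, h]
    · have h1 : ¬ p.1 < q.1 := not_lt_of_gt h
      have h3 : ¬ p.1 = q.1 := by omega
      simp [Prod.Lex.lt_iff, h1, h, h3]
  rw [hfun]

theorem sorted2_congr_perm {xs ys : List (Int × Int)} (h : xs.Perm ys) :
    PySem.List.sorted2 xs Prod.fst Prod.snd = PySem.List.sorted2 ys Prod.fst Prod.snd := by
  rw [sorted2_eq_sorted_toLex, sorted2_eq_sorted_toLex]
  exact PySem.List.sorted_eq_sorted_of_perm _ _ _ (fun x y hxy => by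
    simpa using congrArg (fun z => ofLex z) hxy) h

-- A's bucket array counts occurrences
theorem bucket_getD (l : List Int) (hl : ∀ v ∈ l, v ≤ 100) :
    ∀ (g : List Int), g.length = 100 → ∀ (j : Nat), j < 100 →
      PySem.List.pyGetD
        (l.foldl (fun g v => if v > 0 then
            PySem.List.pySetD g (v - 1) (PySem.List.pyGetD g (v - 1) 0 + 1) else g) g)
        (j : Int) 0
      = PySem.List.pyGetD g (j : Int) 0 + (l.count ((j : Int) + 1) : Int) := by
  induction l with
  | nil => intro g hg j hj; simp
  | cons v t ih =>
    intro g hg j hj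
    have hv100 := hl v (by simp)
    have hl' : ∀ w ∈ t, w ≤ 100 := fun w hw => hl w (by simp [hw])
    by_cases hpos : v > 0
    · simp only [List.foldl_cons, if_pos hpos]
      have hvm : v - 1 = ((v - 1).toNat : Int) := by omega
      rw [hvm, PySem.List.pySetD_natCast]
      rw [ih hl' _ (by simp [hg]) j hj]
      rw [PySem.List.pyGetD_natCast, PySem.List.pyGetD_natCast, PySem.List.pyGetD_natCast]
      simp only [List.getD_eq_getElem?_getD, List.getElem?_set, hg]
      by_cases hjm : (v - 1).toNat = j
      · have hv : v = (j : Int) + 1 := by omega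
        simp [hj, hv]
        omega
      · have hv : v ≠ (j : Int) + 1 := by omega
        have hjm2 : ¬ (v.toNat - 1 = j) := by omega
        simp [hjm2, hv]
    · simp only [List.foldl_cons, if_neg hpos]
      rw [ih hl' g hg j hj]
      have hv : v ≠ (j : Int) + 1 := by omega
      simp [hv]

theorem bucket_val (l : List Int) (hl : ∀ v ∈ l, v ≤ 100) (j : Int)
    (h0 : 0 ≤ j) (h100 : j < 100) :
    PySem.List.pyGetD
      (l.foldl (fun g v => if v > 0 then
          PySem.List.pySetD g (v - 1) (PySem.List.pyGetD g (v - 1) 0 + 1) else g)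
        (List.replicate 100 (0 : Int)))
      j 0 = (l.count (j + 1) : Int) := by
  have hj : j = ((j.toNat : Nat) : Int) := by omega
  have hrep : PySem.List.pyGetD (List.replicate 100 (0 : Int)) ((j.toNat : Nat) : Int) 0 = 0 := by
    rw [PySem.List.pyGetD_natCast, List.getD_eq_getElem?_getD, List.getElem?_replicate]
    simp [h100]
  rw [hj, bucket_getD l hl _ (by simp) j.toNat (by omega), hrep]
  simp

-- the set of distinct positive values of l, read off A's way (bucket scan) and as a set
theorem bucket_index_perm (l : List Int) (hl : ∀ v ∈ l, v ≤ 100) :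
    (((PySem.List.pyRange 0 100).filter
        (fun j => decide (0 < (l.count (j + 1) : Int)))).map (fun j => j + 1)).Perm
      (PySem.Set.ofList (l.filter (fun v => decide (v > 0)))) := by
  have nd1 : (((PySem.List.pyRange 0 100).filter
      (fun j => decide (0 < (l.count (j + 1) : Int)))).map (fun j => j + 1)).Nodup := by
    refine List.Nodup.map (fun x y hxy => by omega) ?_
    exact ((PySem.List.pairwise_lt_pyRange_one 0 100).imp ne_of_lt).filter _
  have nd2 := PySem.Set.nodup_ofList (l.filter (fun v => decide (v > 0)))
  refine (List.perm_ext_iff_of_nodup nd1 nd2).2 (fun x => ?_)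
  simp only [List.mem_map, List.mem_filter, PySem.Set.mem_ofList, PySem.List.mem_pyRange_one]
  constructor
  · rintro ⟨j, ⟨⟨hj0, hj100⟩, hcnt⟩, rfl⟩
    simp only [decide_eq_true_eq] at hcnt ⊢
    have : j + 1 ∈ l := by
      have : 0 < l.count (j + 1) := by exact_mod_cast hcnt
      exact List.count_pos_iff.mp this
    exact ⟨this, by omega⟩
  · rintro ⟨hx, hpos⟩
    simp only [decide_eq_true_eq] at hpos
    refine ⟨x - 1, ⟨⟨by omega, by have := hl x hx; omega⟩, ?_⟩, by ring⟩
    simp only [decide_eq_true_eq]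
    have : 0 < l.count (x - 1 + 1) := by
      rw [show x - 1 + 1 = x by ring]
      exact List.count_pos_iff.mpr hx
    exact_mod_cast this

-- ---------- B side: run-length encoding of the sorted column ----------

-- the continuation of B's run-length loop: current run is c copies of p
def runsAux (p c : Int) : List Int → List (Int × Int)
  | [] => [(c, p)]
  | v :: t => if v = p then runsAux p (c + 1) t else (c, p) :: runsAux v 1 t

theorem rle_fold : ∀ (s : List Int) (pairs : List (Int × Int)) (p c : Int), 0 < c →
    rleFlush (s.foldl rleStep (pairs, c, some p)) = pairs ++ runsAux p c s := by
  intro s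
  induction s with
  | nil =>
    intro pairs p c hc
    simp [rleFlush, runsAux, show c ≠ 0 by omega]
  | cons v t ih =>
    intro pairs p c hc
    by_cases hvp : v = p
    · subst hvp
      rw [List.foldl_cons, show rleStep (pairs, c, some v) v = (pairs, c + 1, some v) by
        simp [rleStep]]
      rw [ih pairs v (c + 1) (by omega), runsAux, if_pos rfl]
    · rw [List.foldl_cons, show rleStep (pairs, c, some p) v
          = (pairs ++ [(c, p)], 1, some v) by
        simp [rleStep, hvp, show c ≠ 0 by omega]]
      rw [ih _ v 1 one_pos, runsAux, if_neg hvp]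
      simp

theorem rle_run_cons (v : Int) (t : List Int) :
    rleFlush ((v :: t).foldl rleStep ([], 0, none)) = runsAux v 1 t := by
  rw [List.foldl_cons, show rleStep ([], 0, none) v = ([], 1, some v) by
    simp [rleStep]]
  exact rle_fold t [] v 1 one_pos

-- runs of a sorted list are exactly the distinct values with their counts
theorem runsAux_spec : ∀ (t : List Int) (p c : Int),
    List.Pairwise (· ≤ ·) (p :: t) →
    ∃ D : List Int, D.Nodup ∧ (∀ x, x ∈ D ↔ x ∈ p :: t) ∧
      runsAux p c t
        = D.map (fun v => ((if v = p then c - 1 else 0) + (((p :: t).count v : Nat) : Int), v)) := by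
  intro t
  induction t with
  | nil =>
    intro p c _
    refine ⟨[p], by simp, by simp, ?_⟩
    simp only [runsAux, List.map_cons, List.map_nil]
    simp
  | cons v t' ih =>
    intro p c hpw
    obtain ⟨hp1, hpw2⟩ := List.pairwise_cons.1 hpw
    obtain ⟨hv1, hpw3⟩ := List.pairwise_cons.1 hpw2
    by_cases hvp : v = p
    · subst hvp
      have hpw' : List.Pairwise (· ≤ ·) (v :: t') :=
        List.pairwise_cons.2 ⟨fun x hx => hp1 x (List.mem_cons_of_mem _ hx), hpw3⟩
      obtain ⟨D, hnd, hmem, heq⟩ := ih v (c + 1) hpw'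
      refine ⟨D, hnd, ?_, ?_⟩
      · intro x; rw [hmem x]; simp
      · rw [show runsAux v c (v :: t') = runsAux v (c + 1) t' by
          rw [runsAux, if_pos rfl], heq]
        refine List.map_congr_left (fun w hw => ?_)
        by_cases hwv : w = v
        · subst hwv
          simp
        · simp [hwv, Ne.symm hwv]
    · have hplt : p < v := lt_of_le_of_ne (hp1 v (List.mem_cons_self)) (fun h => hvp h.symm)
      obtain ⟨D, hnd, hmem, heq⟩ := ih v 1 hpw2
      have hpvt : p ∉ v :: t' := by
        intro hp
        rcases List.mem_cons.1 hp with h | h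
        · omega
        · exact absurd (hv1 p h) (by omega)
      have hpD : p ∉ D := fun hp => hpvt ((hmem p).1 hp)
      refine ⟨p :: D, List.nodup_cons.2 ⟨hpD, hnd⟩, ?_, ?_⟩
      · intro x
        simp only [List.mem_cons, hmem x]
      · rw [show runsAux p c (v :: t') = (c, p) :: runsAux v 1 t' by
          rw [runsAux, if_neg hvp], heq, List.map_cons]
        have hc0 : (v :: t').count p = 0 := List.count_eq_zero.2 hpvt
        have hhd : ((if p = p then c - 1 else 0) + (((p :: v :: t').count p : Nat) : Int), p)
            = ((c : Int), p) := by
          simp [hc0]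
        rw [hhd]
        congr 1
        refine List.map_congr_left (fun w hw => ?_)
        have hwvt : w ∈ v :: t' := (hmem w).1 hw
        have hwp : w ≠ p := fun h => hpvt (h ▸ hwvt)
        simp [hwp, Ne.symm hwp]

-- one column: sorted run-length pairs of the positive values equal, as a sorted2,
-- the distinct positive values with their counts
theorem rle_side (l : List Int) :
    PySem.List.sorted2
      (rleFlush
        ((PySem.List.sorted (l.filter (fun v => decide (v > 0))) (fun x => x)).foldl
          rleStep ([], 0, none)))
      Prod.fst Prod.snd
    = PySem.List.sorted2
        ((PySem.Set.ofList (l.filter (fun v => decide (v > 0)))).map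
          (fun v => (((l.count v : Nat) : Int), v)))
        Prod.fst Prod.snd := by
  set P := l.filter (fun v => decide (v > 0)) with hP
  have hperm : (PySem.List.sorted P (fun x => x)).Perm P := PySem.List.sorted_perm P _ _
  cases hs : PySem.List.sorted P (fun x => x) with
  | nil =>
    have hPnil : P = [] := (PySem.List.sorted_eq_nil_iff P _ _).1 hs
    rw [hPnil]
    rfl
  | cons v t =>
    have hpw : List.Pairwise (· ≤ ·) (v :: t) := by
      have := PySem.List.sorted_pairwise P (fun x => x)
      rw [hs] at this
      exact this
    obtain ⟨D, hnd, hmem, heq⟩ := runsAux_spec t v 1 hpw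
    rw [rle_run_cons, heq]
    have hperm' : (v :: t).Perm P := by rw [← hs]; exact hperm
    have hcnt : ∀ w ∈ D, ((if w = v then (1 : Int) - 1 else 0) + (((v :: t).count w : Nat) : Int), w)
        = (((l.count w : Nat) : Int), w) := by
      intro w hw
      have hwm : w ∈ v :: t := (hmem w).1 hw
      have hwP : w ∈ P := hperm'.mem_iff.1 hwm
      have hwpos : decide (w > 0) = true := (List.mem_filter.1 hwP).2
      have h1 : (v :: t).count w = P.count w := hperm'.count_eq w
      have h2 : P.count w = l.count w := by
        rw [hP, List.count_filter]
        simp [hwpos]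
      rw [h1, h2]
      split_ifs <;> simp
    rw [List.map_congr_left hcnt]
    refine sorted2_congr_perm (List.Perm.map _ ?_)
    refine (List.perm_ext_iff_of_nodup hnd (PySem.Set.nodup_ofList P)).2 (fun x => ?_)
    rw [hmem x, PySem.Set.mem_ofList, hperm'.mem_iff]

-- one column: A's bucket scan + sort equals B's sort + run-length encode + sort
theorem col_eq (l : List Int) (hl : ∀ v ∈ l, v ≤ 100) :
    PySem.List.sorted2
      ((PySem.List.pyRange 0 100).foldl
        (fun tmp j =>
          if PySem.List.pyGetD
              (l.foldl (fun g v => if v > 0 then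
                  PySem.List.pySetD g (v - 1) (PySem.List.pyGetD g (v - 1) 0 + 1) else g)
                (List.replicate 100 (0 : Int))) j 0 > 0 then
            tmp ++ [(PySem.List.pyGetD
              (l.foldl (fun g v => if v > 0 then
                  PySem.List.pySetD g (v - 1) (PySem.List.pyGetD g (v - 1) 0 + 1) else g)
                (List.replicate 100 (0 : Int))) j 0, j + 1)]
          else tmp) [])
      Prod.fst Prod.snd
    = PySem.List.sorted2
        (rleFlush
          ((PySem.List.sorted (l.filter (fun v => decide (v > 0))) (fun x => x)).foldl
            rleStep ([], 0, none)))
        Prod.fst Prod.snd := by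
  set G := l.foldl (fun g v => if v > 0 then
      PySem.List.pySetD g (v - 1) (PySem.List.pyGetD g (v - 1) 0 + 1) else g)
    (List.replicate 100 (0 : Int)) with hG
  set P := l.filter (fun v => decide (v > 0)) with hP
  rw [PySem.List.foldl_append_ite (p := fun j => PySem.List.pyGetD G j 0 > 0)
    (f := fun j => (PySem.List.pyGetD G j 0, j + 1)), List.nil_append]
  have hfilt : ((PySem.List.pyRange 0 100).filter (fun j => decide (PySem.List.pyGetD G j 0 > 0)))
      = ((PySem.List.pyRange 0 100).filter (fun j => decide (0 < (l.count (j + 1) : Int)))) := by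
    refine List.filter_congr (fun j hj => ?_)
    rw [PySem.List.mem_pyRange_one] at hj
    rw [hG, bucket_val l hl j hj.1 hj.2]
  have hmapA : ((PySem.List.pyRange 0 100).filter
        (fun j => decide (0 < (l.count (j + 1) : Int)))).map
        (fun j => (PySem.List.pyGetD G j 0, j + 1))
      = (((PySem.List.pyRange 0 100).filter
          (fun j => decide (0 < (l.count (j + 1) : Int)))).map (fun j => j + 1)).map
        (fun v => (((l.count v : Nat) : Int), v)) := by
    rw [List.map_map]
    refine List.map_congr_left (fun j hj => ?_)
    rw [List.mem_filter, PySem.List.mem_pyRange_one] at hj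
    simp only [Function.comp]
    rw [hG, bucket_val l hl j hj.1.1 hj.1.2]
  rw [hfilt, hmapA, rle_side l]
  exact sorted2_congr_perm ((bucket_index_perm l hl).map _)

-- the per-column computations of the two ports, written out (A side)
def gbucket (a : List (List Int)) (i : Int) : List Int :=
  (PySem.List.pyRange 0 (PySem.List.len a)).foldl
    (fun g j =>
      if PySem.List.pyGetD (PySem.List.pyGetD a j []) i 0 > 0 then
        PySem.List.pySetD g (PySem.List.pyGetD (PySem.List.pyGetD a j []) i 0 - 1)
          (PySem.List.pyGetD g (PySem.List.pyGetD (PySem.List.pyGetD a j []) i 0 - 1) 0 + 1)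
      else g)
    (List.replicate 100 (0 : Int))

def colA (a : List (List Int)) (i : Int) : List (Int × Int) :=
  (PySem.List.pyRange 0 100).foldl
    (fun tmp j =>
      if PySem.List.pyGetD (gbucket a i) j 0 > 0 then
        tmp ++ [(PySem.List.pyGetD (gbucket a i) j 0, j + 1)]
      else tmp) []

theorem cols_eq (a : List (List Int)) (h : Pre_calC a) :
    ((PySem.List.pyRange 0 (PySem.List.len (PySem.List.pyGetD a 0 []))).foldl
        (fun b i => b ++ [colA a i]) []).map
        (fun col => PySem.List.sorted2 col Prod.fst Prod.snd)
    = (PySem.List.pyRange 0 (PySem.List.len (PySem.List.pyGetD a 0 []))).foldl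
        (fun cols i => cols ++ [calC_alt_col a i]) [] := by
  obtain ⟨hne, hrows⟩ := h
  obtain ⟨r, t, rfl⟩ := List.exists_cons_of_ne_nil hne
  rw [PySem.List.foldl_append_singleton_eq_map, PySem.List.foldl_append_singleton_eq_map,
    List.nil_append, List.nil_append, List.map_map]
  refine List.map_congr_left (fun i hi => ?_)
  simp only [Function.comp_apply]
  rw [PySem.List.mem_pyRange_one] at hi
  have hN : PySem.List.pyGetD (r :: t) 0 [] = r := by
    simp [PySem.List.pyGetD, PySem.List.pyGet?, PySem.List.pyIdx?]
  rw [hN] at hi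
  have hilt : i.toNat < r.length := by
    have := hi.2; unfold PySem.List.len at this; omega
  -- every value A or B reads in column i is ≤ 100
  have hl : ∀ v ∈ colList (r :: t) i, v ≤ 100 := by
    intro v hv
    rw [colList, List.mem_map] at hv
    obtain ⟨row, hrow, rfl⟩ := hv
    have hlen : r.length ≤ row.length := by
      have := (hrows row hrow).1; simpa using this
    have hiNat : i = ((i.toNat : Nat) : Int) := by omega
    have hrowlt : i.toNat < row.length := lt_of_lt_of_le hilt hlen
    have hval : PySem.List.pyGetD row i 0 = row[i.toNat] := by
      conv_lhs => rw [hiNat]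
      rw [PySem.List.pyGetD_natCast, List.getD_eq_getElem?_getD,
        List.getElem?_eq_getElem hrowlt]
      rfl
    rw [hval]
    have htlt : i.toNat < (row.take r.length).length := by
      simp [List.length_take]; omega
    have htake : row[i.toNat] ∈ row.take r.length := by
      have hgt : (row.take r.length)[i.toNat]'htlt = row[i.toNat] := List.getElem_take
      rw [← hgt]; exact List.getElem_mem htlt
    have := (hrows row hrow).2 row[i.toNat] (by simpa using htake)
    exact this
  -- rewrite A's bucket fold as a fold over the column values
  have e1 : gbucket (r :: t) i
      = (colList (r :: t) i).foldl
          (fun g v => if v > 0 then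
              PySem.List.pySetD g (v - 1) (PySem.List.pyGetD g (v - 1) 0 + 1) else g)
          (List.replicate 100 (0 : Int)) := by
    unfold gbucket colList
    rw [PySem.List.foldl_pyRange_pyGetD (r :: t) ([] : List Int)
      (fun g row => if PySem.List.pyGetD row i 0 > 0 then
          PySem.List.pySetD g (PySem.List.pyGetD row i 0 - 1)
            (PySem.List.pyGetD g (PySem.List.pyGetD row i 0 - 1) 0 + 1) else g)
      (List.replicate 100 (0 : Int)) (le_refl 0), Int.toNat_zero, List.drop_zero]
    rw [List.foldl_map (f := fun row => PySem.List.pyGetD row i 0)]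
  unfold colA calC_alt_col
  rw [e1]
  exact col_eq (colList (r :: t) i) hl

-- ---------- tail: A's pad / truncate / transpose vs B's direct row emission ----------

def padCol (L : Int) (c : List (Int × Int)) : List (Int × Int) :=
  (c ++ List.replicate L.toNat ((0 : Int), (0 : Int))).take L.toNat

def flatCol (c : List (Int × Int)) : List Int := c.flatMap (fun p => [p.2, p.1])

theorem flatCol_length (c : List (Int × Int)) : (flatCol c).length = 2 * c.length := by
  induction c with
  | nil => simp [flatCol]
  | cons p t ih => simp [flatCol] at ih ⊢; omega

theorem padCol_length (L : Int) (c : List (Int × Int)) : (padCol L c).length = L.toNat := by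
  simp [padCol]

theorem pyRange_self (p : Int) : PySem.List.pyRange p p = [] := by
  refine List.eq_nil_iff_forall_not_mem.2 (fun x hx => ?_)
  rw [PySem.List.mem_pyRange_one] at hx; omega

theorem fold_append_const {α : Type} (x : α) (m : Int) (c : List α) :
    (PySem.List.pyRange 0 m).foldl (fun bi _ => bi ++ [x]) c
      = c ++ List.replicate m.toNat x := by
  rw [PySem.List.foldl_append_singleton_eq_map (f := fun _ => x)]
  congr 1
  rcases le_or_gt 0 m with hm | hm
  · rw [show m = ((m.toNat : Nat) : Int) by omega, PySem.List.pyRange_zero_natCast]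
    simp [Function.comp_def, List.map_const']
    omega
  · rw [show PySem.List.pyRange 0 m = [] from List.eq_nil_iff_forall_not_mem.2
      (fun y hy => by rw [PySem.List.mem_pyRange_one] at hy; omega)]
    simp [show m.toNat = 0 by omega]

theorem getD_at {α : Type} (pre : List α) (x : α) (s : List α) (d : α) :
    PySem.List.pyGetD (pre ++ x :: s) ((pre.length : Nat) : Int) d = x := by
  rw [PySem.List.pyGetD_natCast, List.getD_eq_getElem?_getD,
    List.getElem?_append_right (le_refl _)]
  simp

theorem setD_at {α : Type} (pre : List α) (x y : α) (s : List α) :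
    PySem.List.pySetD (pre ++ x :: s) ((pre.length : Nat) : Int) y = pre ++ y :: s := by
  rw [PySem.List.pySetD_natCast]
  rw [List.set_append_right _ _ (le_refl _)]
  simp

-- what A's pad/truncate loop does to one column
def padF (L : Int) (c : List (Int × Int)) : List (Int × Int) :=
  if (c.length : Int) < L then
    c ++ List.replicate (L - (c.length : Int)).toNat ((0 : Int), (0 : Int))
  else if (c.length : Int) > 50 then c.take 50 else c

theorem pad_fold (L : Int) :
    ∀ (suf pre : List (List (Int × Int))),
      (PySem.List.pyRange (pre.length) ((pre.length : Int) + suf.length)).foldl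
        (fun b i =>
          if PySem.List.len (PySem.List.pyGetD b i []) < L then
            PySem.List.pySetD b i
              ((PySem.List.pyRange 0 (L - PySem.List.len (PySem.List.pyGetD b i []))).foldl
                (fun bi _ => bi ++ [((0 : Int), (0 : Int))]) (PySem.List.pyGetD b i []))
          else if PySem.List.len (PySem.List.pyGetD b i []) > 50 then
            PySem.List.pySetD b i (PySem.List.slice (PySem.List.pyGetD b i []) none (some 50))
          else b)
        (pre ++ suf)
      = pre ++ suf.map (padF L) := by
  intro suf
  induction suf with
  | nil =>
    intro pre
    simp only [List.length_nil, Nat.cast_zero, add_zero, List.map_nil, List.append_nil]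
    rw [pyRange_self]
    rfl
  | cons c s ih =>
    intro pre
    have hlt : (pre.length : Int) < (pre.length : Int) + (c :: s).length := by
      simp
    rw [PySem.List.pyRange_one_cons hlt, List.foldl_cons]
    have hstep :
        (if PySem.List.len (PySem.List.pyGetD (pre ++ c :: s) (pre.length : Int) []) < L then
            PySem.List.pySetD (pre ++ c :: s) (pre.length : Int)
              ((PySem.List.pyRange 0
                  (L - PySem.List.len (PySem.List.pyGetD (pre ++ c :: s) (pre.length : Int) []))).foldl
                (fun bi _ => bi ++ [((0 : Int), (0 : Int))])
                (PySem.List.pyGetD (pre ++ c :: s) (pre.length : Int) []))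
          else if PySem.List.len (PySem.List.pyGetD (pre ++ c :: s) (pre.length : Int) []) > 50 then
            PySem.List.pySetD (pre ++ c :: s) (pre.length : Int)
              (PySem.List.slice (PySem.List.pyGetD (pre ++ c :: s) (pre.length : Int) []) none (some 50))
          else pre ++ c :: s)
        = pre ++ padF L c :: s := by
      rw [getD_at, fold_append_const, setD_at, setD_at]
      unfold PySem.List.len padF
      rw [PySem.List.slice_to _ (by omega : (0:Int) ≤ 50)]
      split_ifs <;> rfl
    rw [hstep]
    have hassoc : pre ++ padF L c :: s = (pre ++ [padF L c]) ++ s := by simp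
    rw [hassoc]
    have h1 : ((pre.length : Int) + 1) = (((pre ++ [padF L c]).length : Nat) : Int) := by
      simp
    have h2 : ((pre.length : Int) + ((c :: s).length : Int))
        = (((pre ++ [padF L c]).length : Int) + ((s.length : Int))) := by
      simp
      ring
    rw [h1, h2, ih (pre ++ [padF L c])]
    simp

theorem padF_eq_padCol (L0 : Int) (h0 : 0 ≤ L0) (c : List (Int × Int))
    (hc : (c.length : Int) ≤ L0) :
    padF (if L0 > 50 then 50 else L0) c = padCol (if L0 > 50 then 50 else L0) c := by
  unfold padF padCol
  set L := if L0 > 50 then (50 : Int) else L0 with hLdef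
  have hL0 : 0 ≤ L := by rw [hLdef]; split_ifs <;> omega
  have hL50 : L ≤ 50 := by rw [hLdef]; split_ifs <;> omega
  by_cases h1 : (c.length : Int) < L
  · rw [if_pos h1, List.take_append, List.take_of_length_le (by omega),
      List.take_replicate]
    congr 1
    congr 1
    omega
  · rw [if_neg h1, List.take_append,
      show L.toNat - c.length = 0 by omega, List.take_zero, List.append_nil]
    by_cases h2 : (c.length : Int) > 50
    · rw [if_pos h2]
      have hL : L = 50 := by rw [hLdef]; split_ifs <;> omega
      rw [show L.toNat = 50 by omega]
    · rw [if_neg h2]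
      exact (List.take_of_length_le (by omega)).symm

-- the transposing inner loop body of A (2j / 2j+1 appends), written out
def tstep (c : List (Int × Int)) (na : List (List Int)) (j : Int) : List (List Int) :=
  PySem.List.pySetD
    (PySem.List.pySetD na (2 * j)
      (PySem.List.pyGetD na (2 * j) [] ++ [(PySem.List.pyGetD c j ((0 : Int), (0 : Int))).2]))
    (2 * j + 1)
    (PySem.List.pyGetD
      (PySem.List.pySetD na (2 * j)
        (PySem.List.pyGetD na (2 * j) [] ++ [(PySem.List.pyGetD c j ((0 : Int), (0 : Int))).2]))
      (2 * j + 1) []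
      ++ [(PySem.List.pyGetD c j ((0 : Int), (0 : Int))).1])

theorem inner_aux :
    ∀ (rest done c : List (Int × Int)), c = done ++ rest →
      ∀ (na1 na2 : List (List Int)), na1.length = 2 * done.length →
        na2.length = 2 * rest.length →
      (PySem.List.pyRange (done.length) ((done.length : Int) + rest.length)).foldl
        (tstep c) (na1 ++ na2)
      = na1 ++ List.zipWith (fun row x => row ++ [x]) na2 (flatCol rest) := by
  intro rest
  induction rest with
  | nil =>
    intro done c hc na1 na2 h1 h2
    have hna2 : na2 = [] := List.length_eq_zero_iff.mp (by simpa using h2)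
    subst hna2
    simp only [List.length_nil, Nat.cast_zero, add_zero, List.zipWith_nil_left,
      List.append_nil]
    rw [pyRange_self]
    rfl
  | cons p rest ih =>
    intro done c hc na1 na2 h1 h2
    obtain ⟨r1, na2', rfl⟩ : ∃ r1 t, na2 = r1 :: t := by
      cases na2 with
      | nil => simp at h2
      | cons a t => exact ⟨a, t, rfl⟩
    obtain ⟨r2, na2'', rfl⟩ : ∃ r2 t, na2' = r2 :: t := by
      cases na2' with
      | nil => exfalso; simp at h2; omega
      | cons a t => exact ⟨a, t, rfl⟩
    have hlt : (done.length : Int) < (done.length : Int) + ((p :: rest).length : Int) := by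
      simp
    rw [PySem.List.pyRange_one_cons hlt, List.foldl_cons]
    have hstep : tstep c (na1 ++ r1 :: r2 :: na2'') ((done.length : Nat) : Int)
        = (na1 ++ [r1 ++ [p.2], r2 ++ [p.1]]) ++ na2'' := by
      unfold tstep
      have hc1 : PySem.List.pyGetD c ((done.length : Nat) : Int) ((0 : Int), (0 : Int)) = p := by
        rw [hc]; exact getD_at done p rest _
      rw [hc1]
      have h2j : (2 : Int) * ((done.length : Nat) : Int) = ((na1.length : Nat) : Int) := by
        push_cast [h1]; ring
      rw [h2j, getD_at na1 r1 _ _, setD_at na1 r1 _ _]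
      have hassoc1 : na1 ++ (r1 ++ [p.2]) :: r2 :: na2''
          = (na1 ++ [r1 ++ [p.2]]) ++ r2 :: na2'' := by simp
      have h2j1 : ((na1.length : Nat) : Int) + 1
          = (((na1 ++ [r1 ++ [p.2]]).length : Nat) : Int) := by simp
      rw [hassoc1, h2j1, getD_at _ r2 _ _, setD_at _ r2 _ _]
      simp
    rw [hstep]
    have hc' : c = (done ++ [p]) ++ rest := by simp [hc]
    have hih := ih (done ++ [p]) c hc' (na1 ++ [r1 ++ [p.2], r2 ++ [p.1]]) na2''
      (by simp [h1]; ring) (by simp at h2; omega)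
    rw [show (done.length : Int) + 1 = (((done ++ [p]).length : Nat) : Int) by simp]
    rw [show (done.length : Int) + ((p :: rest).length : Int)
      = (((done ++ [p]).length : Int) + ((rest.length : Int))) by simp; ring]
    rw [hih]
    simp [flatCol]

theorem inner_eq (c : List (Int × Int)) (na : List (List Int)) (h : na.length = 2 * c.length) :
    (PySem.List.pyRange 0 (PySem.List.len c)).foldl (tstep c) na
      = List.zipWith (fun row x => row ++ [x]) na (flatCol c) := by
  have := inner_aux c [] c rfl [] na rfl (by simpa using h)
  simp only [List.length_nil, Nat.cast_zero, zero_add, List.nil_append] at this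
  exact this

theorem fold_inner_to_zip :
    ∀ (cs : List (List (Int × Int))) (na : List (List Int)),
      (∀ c ∈ cs, 2 * c.length = na.length) →
      cs.foldl (fun na c => (PySem.List.pyRange 0 (PySem.List.len c)).foldl (tstep c) na) na
        = cs.foldl (fun na c => List.zipWith (fun row x => row ++ [x]) na (flatCol c)) na := by
  intro cs
  induction cs with
  | nil => intro na _; rfl
  | cons c cs ih =>
    intro na hlen
    rw [List.foldl_cons, List.foldl_cons, inner_eq c na (hlen c (by simp)).symm]
    refine ih _ (fun c' hc' => ?_)
    rw [List.length_zipWith, flatCol_length]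
    have h1 := hlen c (by simp)
    have h2 := hlen c' (by simp [hc'])
    omega

theorem zfold_getElem? :
    ∀ (cs : List (List (Int × Int))) (na : List (List Int)),
      (∀ c ∈ cs, 2 * c.length = na.length) → ∀ (r : Nat),
      (cs.foldl (fun na c => List.zipWith (fun row x => row ++ [x]) na (flatCol c)) na)[r]?
        = na[r]?.map (fun row => row ++ cs.map (fun c => (flatCol c).getD r 0)) := by
  intro cs
  induction cs with
  | nil =>
    intro na _ r
    cases h : na[r]? <;> simp [h]
  | cons c cs ih =>
    intro na hlen r
    rw [List.foldl_cons]
    have hc := hlen c (by simp)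
    have hlen' : ∀ c' ∈ cs,
        2 * c'.length = (List.zipWith (fun row x => row ++ [x]) na (flatCol c)).length := by
      intro c' hc'
      rw [List.length_zipWith, flatCol_length]
      have := hlen c' (by simp [hc'])
      omega
    rw [ih _ hlen' r, List.getElem?_zipWith]
    by_cases hr : r < na.length
    · have hrf : r < (flatCol c).length := by rw [flatCol_length]; omega
      rw [List.getElem?_eq_getElem hr, List.getElem?_eq_getElem hrf]
      simp [List.getD_eq_getElem?_getD, List.getElem?_eq_getElem hrf]
    · rw [List.getElem?_eq_none (l := na) (by omega),
        List.getElem?_eq_none (l := flatCol c) (by rw [flatCol_length]; omega)]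
      simp

-- the intermediate quantities of the two tails, named for the proof
def len0 (M : List (List (Int × Int))) : Int :=
  (PySem.List.pyRange 0 (PySem.List.len M)).foldl
    (fun len i => max len (PySem.List.len (PySem.List.pyGetD M i []))) 0

def lenA (M : List (List (Int × Int))) : Int := if len0 M > 50 then 50 else len0 M

def padB (M : List (List (Int × Int))) : List (List (Int × Int)) :=
  (PySem.List.pyRange 0 (PySem.List.len M)).foldl
    (fun b i =>
      if PySem.List.len (PySem.List.pyGetD b i []) < lenA M then
        PySem.List.pySetD b i
          ((PySem.List.pyRange 0 (lenA M - PySem.List.len (PySem.List.pyGetD b i []))).foldl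
            (fun bi _ => bi ++ [((0 : Int), (0 : Int))]) (PySem.List.pyGetD b i []))
      else if PySem.List.len (PySem.List.pyGetD b i []) > 50 then
        PySem.List.pySetD b i (PySem.List.slice (PySem.List.pyGetD b i []) none (some 50))
      else b)
    M

def minL (M : List (List (Int × Int))) : Int :=
  min (PySem.List.maxD (M.map PySem.List.len) (fun x => x) 0) 50

theorem len0_eq (M : List (List (Int × Int))) :
    len0 M = M.foldl (fun acc c => max acc (PySem.List.len c)) 0 := by
  unfold len0
  rw [PySem.List.foldl_pyRange_pyGetD M ([] : List (Int × Int))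
    (fun acc c => max acc (PySem.List.len c)) 0 (le_refl 0)]
  simp

theorem minL_eq (M : List (List (Int × Int))) : minL M = lenA M := by
  have h0 : 0 ≤ len0 M := by
    rw [len0_eq]
    exact (PySem.List.le_foldl_max_int M PySem.List.len 0).1
  have hmaxD : PySem.List.maxD (M.map PySem.List.len) (fun x => x) 0
      = M.foldl (fun acc c => max acc (PySem.List.len c)) 0 := by
    cases M with
    | nil => simp [PySem.List.maxD_nil]
    | cons c t =>
      rw [List.map_cons, PySem.List.maxD_id_cons, List.foldl_cons]
      rw [show max 0 (PySem.List.len c) = PySem.List.len c by unfold PySem.List.len; omega]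
      rw [List.foldl_map]
  unfold minL lenA
  rw [hmaxD, ← len0_eq]
  split_ifs <;> omega

-- indexing the flattened [value, count, value, count, …] of a column
theorem flat_getD (q : List (Int × Int)) :
    ∀ (k : Nat) (hk : k < q.length),
      (flatCol q).getD (2 * k) 0 = (q[k]'hk).2 ∧ (flatCol q).getD (2 * k + 1) 0 = (q[k]'hk).1 := by
  induction q with
  | nil => intro k hk; simp at hk
  | cons p t ih =>
    intro k hk
    cases k with
    | zero => simp [flatCol]
    | succ k' =>
      have hk' : k' < t.length := by simpa using hk
      have := ih k' hk'
      constructor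
      · rw [show 2 * (k' + 1) = (2 * k' + 1) + 1 by ring]
        simpa [flatCol, List.getD_cons_succ] using this.1
      · rw [show 2 * (k' + 1) + 1 = ((2 * k' + 1) + 1) + 1 by ring]
        simpa [flatCol, List.getD_cons_succ] using this.2

-- one entry of B's directly-emitted rows, as an index into A's padded flat column
theorem ent (L : Int) (_hL : 0 ≤ L) (c : List (Int × Int)) (k : Nat) (hk : k < L.toNat) :
    ((flatCol (padCol L c)).getD (2 * k) 0
        = (if (k : Int) < PySem.List.len c
            then (PySem.List.pyGetD c (k : Int) ((0 : Int), (0 : Int))).2 else 0))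
    ∧ ((flatCol (padCol L c)).getD (2 * k + 1) 0
        = (if (k : Int) < PySem.List.len c
            then (PySem.List.pyGetD c (k : Int) ((0 : Int), (0 : Int))).1 else 0)) := by
  have hkq : k < (padCol L c).length := by rw [padCol_length]; exact hk
  have hflat := flat_getD (padCol L c) k hkq
  have hq : (padCol L c)[k]'hkq = if k < c.length then c.getD k ((0 : Int), (0 : Int)) else ((0 : Int), (0 : Int)) := by
    simp only [padCol]
    rw [List.getElem_take]
    by_cases hkc : k < c.length
    · rw [if_pos hkc]
      rw [List.getElem_append_left hkc, List.getD_eq_getElem?_getD,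
        List.getElem?_eq_getElem hkc]
      rfl
    · rw [if_neg hkc]
      rw [List.getElem_append_right (by omega)]
      simp
  have hlen : ((k : Int) < PySem.List.len c) ↔ (k < c.length) := by
    unfold PySem.List.len; omega
  have hget : PySem.List.pyGetD c (k : Int) ((0 : Int), (0 : Int)) = c.getD k ((0 : Int), (0 : Int)) :=
    PySem.List.pyGetD_natCast c k _
  constructor
  · rw [hflat.1, hq, hget]
    by_cases hkc : k < c.length
    · rw [if_pos hkc, if_pos (hlen.2 hkc)]
    · rw [if_neg hkc, if_neg (fun h => hkc (hlen.1 h))]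
  · rw [hflat.2, hq, hget]
    by_cases hkc : k < c.length
    · rw [if_pos hkc, if_pos (hlen.2 hkc)]
    · rw [if_neg hkc, if_neg (fun h => hkc (hlen.1 h))]

-- a doubled range mapped is the range flat-mapped in (2j, 2j+1) pairs
theorem range_double_flatMap {α : Type} (f : Nat → α) :
    ∀ (n : Nat), (List.range (2 * n)).map f
      = (List.range n).flatMap (fun j => [f (2 * j), f (2 * j + 1)]) := by
  intro n
  induction n with
  | zero => simp
  | succ m ih =>
    rw [show 2 * (m + 1) = (2 * m + 1) + 1 by ring, List.range_succ, List.range_succ,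
      List.range_succ, List.flatMap_append, ← ih]
    simp

-- A's whole tail, characterised row by row
theorem Atail (M : List (List (Int × Int))) :
    calC_tail M = (List.range (2 * (lenA M).toNat)).map
      (fun r => M.map (fun c => (flatCol (padCol (lenA M) c)).getD r 0)) := by
  have hA : calC_tail M =
      (PySem.List.pyRange 0 (PySem.List.len (padB M))).foldl
        (fun na i =>
          (PySem.List.pyRange 0 (PySem.List.len (PySem.List.pyGetD (padB M) i []))).foldl
            (tstep (PySem.List.pyGetD (padB M) i [])) na)
        ((PySem.List.pyRange 0 (lenA M * 2)).foldl (fun na _ => na ++ [([] : List Int)]) []) := rfl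
  rw [hA]
  have h0 : 0 ≤ len0 M := by
    rw [len0_eq]
    exact (PySem.List.le_foldl_max_int M PySem.List.len 0).1
  have hcols : ∀ c ∈ M, (c.length : Int) ≤ len0 M := by
    intro c hc
    rw [len0_eq]
    exact (PySem.List.le_foldl_max_int M PySem.List.len 0).2 c hc
  have hLnn : 0 ≤ lenA M := by unfold lenA; split_ifs <;> omega
  have hpad : padB M = M.map (padCol (lenA M)) := by
    unfold padB
    have hfold := pad_fold (lenA M) M []
    simp only [List.length_nil, Nat.cast_zero, zero_add, List.nil_append] at hfold
    rw [show PySem.List.len M = ((M.length : Nat) : Int) from rfl, hfold]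
    refine List.map_congr_left (fun c hc => ?_)
    have := padF_eq_padCol (len0 M) h0 c (hcols c hc)
    unfold lenA
    exact this
  have hnew : (PySem.List.pyRange 0 (lenA M * 2)).foldl (fun na _ => na ++ [([] : List Int)]) []
      = List.replicate (lenA M * 2).toNat ([] : List Int) := by
    rw [fold_append_const, List.nil_append]
  rw [hpad, hnew]
  rw [PySem.List.foldl_pyRange_pyGetD (M.map (padCol (lenA M))) ([] : List (Int × Int))
    (fun na c => (PySem.List.pyRange 0 (PySem.List.len c)).foldl (tstep c) na) _ (le_refl 0)]
  simp only [Int.toNat_zero, List.drop_zero]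
  rw [fold_inner_to_zip (M.map (padCol (lenA M))) _ (fun c hc => by
    obtain ⟨c0, _, rfl⟩ := List.mem_map.1 hc
    rw [padCol_length, List.length_replicate]
    omega)]
  apply List.ext_getElem?
  intro r
  rw [zfold_getElem? _ _ (fun c hc => by
    obtain ⟨c0, _, rfl⟩ := List.mem_map.1 hc
    rw [padCol_length, List.length_replicate]
    omega) r]
  rw [List.getElem?_replicate, List.getElem?_map]
  have h2L : (lenA M * 2).toNat = 2 * (lenA M).toNat := by omega
  by_cases hr : r < 2 * (lenA M).toNat
  · rw [if_pos (by omega)]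
    rw [show (List.range (2 * (lenA M).toNat))[r]? = some r from by simp [hr]]
    simp only [Option.map_some, List.nil_append, List.map_map]
    rfl
  · rw [if_neg (by omega)]
    rw [show (List.range (2 * (lenA M).toNat))[r]? = none from by simp; omega]
    simp

-- B's whole tail, characterised the same way
theorem Btail (M : List (List (Int × Int))) :
    calC_alt_tail M = (List.range (2 * (lenA M).toNat)).map
      (fun r => M.map (fun c => (flatCol (padCol (lenA M) c)).getD r 0)) := by
  have hB : calC_alt_tail M =
      (PySem.List.pyRange 0 (minL M)).foldl
        (fun out j =>
          out ++ [M.map (fun c =>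
                   if j < PySem.List.len c then (PySem.List.pyGetD c j ((0 : Int), (0 : Int))).2 else 0)]
              ++ [M.map (fun c =>
                   if j < PySem.List.len c then (PySem.List.pyGetD c j ((0 : Int), (0 : Int))).1 else 0)])
        [] := rfl
  rw [hB, minL_eq]
  have hLnn : 0 ≤ lenA M := by
    have h0 : 0 ≤ len0 M := by
      rw [len0_eq]
      exact (PySem.List.le_foldl_max_int M PySem.List.len 0).1
    unfold lenA; split_ifs <;> omega
  obtain ⟨n, hn⟩ : ∃ n : Nat, lenA M = (n : Int) := ⟨(lenA M).toNat, by omega⟩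
  rw [hn, PySem.List.pyRange_zero_natCast]
  simp only [Int.toNat_natCast]
  rw [List.foldl_map]
  simp only [List.append_assoc]
  rw [PySem.List.foldl_append_eq_flatMap, List.nil_append]
  rw [range_double_flatMap]
  refine List.flatMap_congr (fun k hk => ?_)
  rw [List.mem_range] at hk
  have hk' : k < ((n : Int)).toNat := by omega
  have e2 : M.map (fun c =>
        if (k : Int) < PySem.List.len c then (PySem.List.pyGetD c (k : Int) ((0 : Int), (0 : Int))).2 else 0)
      = M.map (fun c => (flatCol (padCol ((n : Nat) : Int) c)).getD (2 * k) 0) :=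
    List.map_congr_left (fun c _ => ((ent ((n : Nat) : Int) (by omega) c k hk').1).symm)
  have e1 : M.map (fun c =>
        if (k : Int) < PySem.List.len c then (PySem.List.pyGetD c (k : Int) ((0 : Int), (0 : Int))).1 else 0)
      = M.map (fun c => (flatCol (padCol ((n : Nat) : Int) c)).getD (2 * k + 1) 0) :=
    List.map_congr_left (fun c _ => ((ent ((n : Nat) : Int) (by omega) c k hk').2).symm)
  rw [e1, e2]
  simp

theorem tail_eq (M : List (List (Int × Int))) : calC_tail M = calC_alt_tail M := by
  rw [Atail, Btail]

-- ===== VERDICT (by name: the statement is the Claim_ definition above) =====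
theorem calC_spec : Claim_equal_calC := by
  intro a _ hpre
  show calC a = calC_alt a
  unfold calC calC_alt
  exact (congrArg calC_tail (cols_eq a hpre)).trans (tail_eq _)
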